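-- pv_equiv track=rewrite | github.com/PeisongZhang/symbolic_tensor_graph | main.py | _build_chunk_cumulative_bounds
-- ===== SOURCE A (Python) =====
-- def _build_chunk_cumulative_bounds(num_stacks, num_chunks):
--     """Split num_stacks transformer blocks into num_chunks chunks with remainder
--     distributed to early chunks. Returns cumulative upper bounds (length=num_chunks)."""
--     sizes = [num_stacks // num_chunks] * num_chunks
--     for i in range(num_stacks % num_chunks):
--         sizes[i] += 1
--     cumulative = []
--     acc = 0
--     for s in sizes:
--         acc += s
--         cumulative.append(acc)
--     return cumulative
-- ===== SOURCE B (Python) =====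
-- def _build_chunk_cumulative_bounds(num_stacks, num_chunks):
--     base = num_stacks // num_chunks
--     rem = num_stacks % num_chunks
--     return [base * (i + 1) + min(i + 1, rem) for i in range(num_chunks)]
-- ===== Notes on version B (the rewrite author's own statement) =====
-- stated objective: simpler
-- what changed: Replaces the sizes list, the remainder-distribution loop and the running accumulator with a single closed-form comprehension cumulative[i] = base*(i+1) + min(i+1, rem).
import Mathlib
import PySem

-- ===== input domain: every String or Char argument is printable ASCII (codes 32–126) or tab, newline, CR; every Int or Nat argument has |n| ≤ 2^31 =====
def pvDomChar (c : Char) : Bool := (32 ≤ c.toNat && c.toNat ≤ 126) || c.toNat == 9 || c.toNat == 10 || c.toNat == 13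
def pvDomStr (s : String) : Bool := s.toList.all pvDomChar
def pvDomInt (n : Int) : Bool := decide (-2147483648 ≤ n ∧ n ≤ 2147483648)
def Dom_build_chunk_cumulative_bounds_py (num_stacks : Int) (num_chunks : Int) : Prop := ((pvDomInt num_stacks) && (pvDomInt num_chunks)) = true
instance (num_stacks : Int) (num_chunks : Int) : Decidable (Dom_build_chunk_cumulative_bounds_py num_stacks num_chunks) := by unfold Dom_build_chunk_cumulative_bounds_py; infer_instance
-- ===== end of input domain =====

-- B replaces the sizes list, the remainder loop and the running accumulator with the
-- closed form cumulative[i] = base*(i+1) + min(i+1, rem): simpler, same cost.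

-- ===== PORT A =====
-- On Pre_ (num_chunks ≠ 0) every index i written by the remainder loop satisfies
-- 0 ≤ i < len(sizes), so pySetD/pyGetD are exact for Python's sizes[i] += 1 here.
def build_chunk_cumulative_bounds_py (num_stacks : Int) (num_chunks : Int) : List Int :=
  let sizes := PySem.List.pyRepeat [PySem.Int.floordiv num_stacks num_chunks] num_chunks
  let sizes := (PySem.List.pyRange 0 (PySem.Int.mod num_stacks num_chunks) 1).foldl
      (fun sz i => PySem.List.pySetD sz i (PySem.List.pyGetD sz i 0 + 1)) sizes
  (sizes.foldl (fun (p : Int × List Int) s => (p.1 + s, p.2 ++ [p.1 + s])) (0, ([] : List Int))).2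

-- ===== PORT B =====
def build_chunk_cumulative_bounds_py_alt (num_stacks : Int) (num_chunks : Int) : List Int :=
  let base := PySem.Int.floordiv num_stacks num_chunks
  let rem := PySem.Int.mod num_stacks num_chunks
  (PySem.List.pyRange 0 num_chunks 1).map (fun i => base * (i + 1) + min (i + 1) rem)

-- ===== PRECONDITION & SPEC =====
-- Pre_ excludes exactly num_chunks = 0, where A raises ZeroDivisionError (B raises too).
def Pre_build_chunk_cumulative_bounds_py (num_stacks : Int) (num_chunks : Int) : Prop := num_chunks ≠ 0
instance (num_stacks : Int) (num_chunks : Int) : Decidable (Pre_build_chunk_cumulative_bounds_py num_stacks num_chunks) := by unfold Pre_build_chunk_cumulative_bounds_py; infer_instance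
def pvWitness_build_chunk_cumulative_bounds_py : Int × Int := (10, 3)

def Spec_build_chunk_cumulative_bounds_py (num_stacks : Int) (num_chunks : Int) (out : List Int) : Prop := out = build_chunk_cumulative_bounds_py_alt num_stacks num_chunks
instance (num_stacks : Int) (num_chunks : Int) (out : List Int) : Decidable (Spec_build_chunk_cumulative_bounds_py num_stacks num_chunks out) := by unfold Spec_build_chunk_cumulative_bounds_py; infer_instance

-- ===== CLAIM (what is proved, stated in full; the proofs are below) =====
def Claim_equal_build_chunk_cumulative_bounds_py : Prop := ∀ (num_stacks : Int) (num_chunks : Int), Dom_build_chunk_cumulative_bounds_py num_stacks num_chunks → Pre_build_chunk_cumulative_bounds_py num_stacks num_chunks → Spec_build_chunk_cumulative_bounds_py num_stacks num_chunks (build_chunk_cumulative_bounds_py num_stacks num_chunks)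

-- ===== LEMMAS AND PROOFS =====

-- the size of chunk i, and the closed-form cumulative bound after m chunks
def pvChunkSize (base : Int) (r : Nat) (i : Nat) : Int := if i < r then base + 1 else base
def pvCum (base : Int) (r : Nat) (m : Nat) : Int := base * (m : Int) + min (m : Int) (r : Int)

theorem pvCum_step (base : Int) (r m : Nat) :
    pvCum base r m + pvChunkSize base r m = pvCum base r (m + 1) := by
  unfold pvCum pvChunkSize
  by_cases h : m < r
  · simp only [h, if_true]
    push_cast
    rw [min_eq_left (show (m : Int) ≤ (r : Int) by omega),
        min_eq_left (show (m : Int) + 1 ≤ (r : Int) by omega)]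
    ring
  · simp only [h, if_false]
    have hr : (r : Int) ≤ (m : Int) := by exact_mod_cast Nat.le_of_not_lt h
    push_cast
    rw [min_eq_right hr, min_eq_right (by omega)]
    ring

-- after the remainder loop the sizes list is pointwise pvChunkSize
theorem pvSetLoop (base : Int) (n : Nat) :
    ∀ r : Nat, r ≤ n →
      (PySem.List.pyRange 0 (r : Int) 1).foldl
        (fun sz i => PySem.List.pySetD sz i (PySem.List.pyGetD sz i 0 + 1))
        (List.replicate n base)
      = (List.range n).map (pvChunkSize base r) := by
  intro r
  induction r with
  | zero =>
    intro _
    rw [PySem.List.pyRange_one_eq_nil (by omega)]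
    simp only [List.foldl_nil]
    apply List.ext_getElem <;> simp [pvChunkSize]
  | succ r ih =>
    intro hr
    have h0 : (0 : Int) ≤ (r : Int) := by positivity
    have hcast : ((r : Int) + 1) = (((r + 1 : Nat) : Int)) := by push_cast; ring
    rw [← hcast, PySem.List.pyRange_one_succ_right h0, List.foldl_append, ih (by omega)]
    simp only [List.foldl_cons, List.foldl_nil]
    have hlen : r < ((List.range n).map (pvChunkSize base r)).length := by
      simp; omega
    rw [PySem.List.pySetD_natCast, PySem.List.pyGetD_natCast]
    apply List.ext_getElem
    · simp
    · intro i h1 h2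
      simp only [List.getElem_set, List.getElem_map, List.getElem_range] at *
      have hget : ((List.range n).map (pvChunkSize base r)).getD r 0 = pvChunkSize base r r := by
        rw [List.getD_eq_getElem _ _ hlen]; simp
      by_cases hir : r = i
      · subst hir
        rw [List.getD_eq_getElem _ 0 hlen]
        simp [pvChunkSize]
      · simp only [hir, if_false]
        unfold pvChunkSize
        by_cases h3 : i < r
        · simp [h3, show i < r + 1 by omega]
        · simp [h3, show ¬ i < r + 1 by omega]

-- Python prefix-sum loop, as a recursion
def pvPrefix : Int → List Int → List Int
  | _, [] => []
  | a, s :: t => (a + s) :: pvPrefix (a + s) t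

theorem pvFoldl_cumul (l : List Int) : ∀ (a : Int) (c : List Int),
    (l.foldl (fun (p : Int × List Int) s => (p.1 + s, p.2 ++ [p.1 + s])) (a, c)).2
      = c ++ pvPrefix a l := by
  induction l with
  | nil => intro a c; simp [pvPrefix]
  | cons s t ih => intro a c; simp [pvPrefix, ih (a + s) (c ++ [a + s])]

theorem pvPrefix_map_range (base : Int) (r : Nat) : ∀ (n : Nat) (a : Int) (m : Nat),
    a = pvCum base r m →
    pvPrefix a ((List.range' m n).map (pvChunkSize base r))
      = (List.range' m n).map (fun i => pvCum base r (i + 1)) := by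
  intro n
  induction n with
  | zero => intro a m _; simp [pvPrefix]
  | succ n ih =>
    intro a m ha
    simp only [List.range'_succ, List.map_cons, pvPrefix]
    rw [ih (a + pvChunkSize base r m) (m + 1) (by rw [ha, pvCum_step])]
    rw [ha, pvCum_step]

-- ===== VERDICT (by name: the statement is the Claim_ definition above) =====
theorem build_chunk_cumulative_bounds_py_spec : Claim_equal_build_chunk_cumulative_bounds_py := by
  intro num_stacks num_chunks _ hpre
  unfold Spec_build_chunk_cumulative_bounds_py
  unfold build_chunk_cumulative_bounds_py build_chunk_cumulative_bounds_py_alt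
  unfold Pre_build_chunk_cumulative_bounds_py at hpre
  dsimp only []
  by_cases hc : 0 < num_chunks
  · -- positive number of chunks
    set base := PySem.Int.floordiv num_stacks num_chunks with hbase
    have hmn : 0 ≤ PySem.Int.mod num_stacks num_chunks := PySem.Int.mod_nonneg num_stacks hc
    have hml : PySem.Int.mod num_stacks num_chunks < num_chunks := PySem.Int.mod_lt num_stacks hc
    set r := (PySem.Int.mod num_stacks num_chunks).toNat with hrdef
    set n := num_chunks.toNat with hndef
    have hrr : PySem.Int.mod num_stacks num_chunks = (r : Int) := by omega
    have hnn : num_chunks = (n : Int) := by omega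
    have hrn : r ≤ n := by omega
    rw [hrr, hnn, PySem.List.pyRepeat_singleton]
    have htn : ((n : Int)).toNat = n := by omega
    rw [htn, pvSetLoop base n r hrn, List.range_eq_range', pvFoldl_cumul,
        pvPrefix_map_range base r n 0 0 (by simp [pvCum])]
    rw [PySem.List.pyRange_one]
    simp only [sub_zero, htn, List.map_map, List.nil_append]
    rw [List.range_eq_range']
    apply List.ext_getElem
    · simp
    · intro i h1 h2
      simp only [List.getElem_map, List.getElem_range', Function.comp_apply, zero_add]
      unfold pvCum
      push_cast
      ring_nf
  · -- negative number of chunks: both sides are []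
    have hneg : num_chunks < 0 := by omega
    have hmod := PySem.Int.mod_neg_bounds num_stacks hneg
    rw [PySem.List.pyRange_one_eq_nil (le_of_lt hneg),
        PySem.List.pyRange_one_eq_nil hmod.2]
    have : num_chunks.toNat = 0 := by omega
    simp [PySem.List.pyRepeat_singleton, this]
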